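-- pv_equiv track=rewrite | github.com/Jamesscott34/Scripting_CA1 | CA_error_consumer.py | analyze_error_sources
-- ===== SOURCE A (Python) =====
-- from collections import defaultdict, Counter
-- from typing import Dict, List, Any, Optional
--
-- def analyze_error_sources(error_entries: List[Dict]) -> Dict[str, int]:
--     """
--     Analyze error sources and services
--
--     Args:
--         error_entries (List[Dict]): List of error entry dictionaries
--
--     Returns:
--         Dict[str, int]: Source analysis results
--     """
--     sources = defaultdict(int)
--
--     for entry in error_entries:
--         content = entry.get("content", "")
--
--         # Common service identifiers
--         if "sshd" in content.lower():
--             sources["ssh_daemon"] += 1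
--         elif "apache" in content.lower() or "httpd" in content.lower():
--             sources["apache_web_server"] += 1
--         elif "nginx" in content.lower():
--             sources["nginx_web_server"] += 1
--         elif "mysql" in content.lower() or "mariadb" in content.lower():
--             sources["mysql_database"] += 1
--         elif "postgresql" in content.lower() or "postgres" in content.lower():
--             sources["postgresql_database"] += 1
--         elif "kernel" in content.lower():
--             sources["kernel"] += 1
--         elif "systemd" in content.lower():
--             sources["systemd"] += 1
--         elif "docker" in content.lower():
--             sources["docker"] += 1
--         elif "fail2ban" in content.lower():
--             sources["fail2ban"] += 1
--         elif "redis" in content.lower():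
--             sources["redis_cache"] += 1
--         elif "mongodb" in content.lower() or "mongo" in content.lower():
--             sources["mongodb_database"] += 1
--         elif "elasticsearch" in content.lower():
--             sources["elasticsearch"] += 1
--         elif "rabbitmq" in content.lower():
--             sources["rabbitmq_message_broker"] += 1
--         elif "kafka" in content.lower():
--             sources["kafka_message_broker"] += 1
--         elif "jenkins" in content.lower():
--             sources["jenkins_ci_cd"] += 1
--         elif "gitlab" in content.lower():
--             sources["gitlab_version_control"] += 1
--         elif "prometheus" in content.lower():
--             sources["prometheus_monitoring"] += 1
--         elif "grafana" in content.lower():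
--             sources["grafana_dashboard"] += 1
--         elif "vault" in content.lower():
--             sources["hashicorp_vault"] += 1
--         else:
--             sources["unknown_source"] += 1
--
--     return dict(sources)
-- ===== SOURCE B (Python) =====
-- from typing import Dict, List
--
-- TABLE = [
--     (("sshd",), "ssh_daemon"),
--     (("apache", "httpd"), "apache_web_server"),
--     (("nginx",), "nginx_web_server"),
--     (("mysql", "mariadb"), "mysql_database"),
--     (("postgresql", "postgres"), "postgresql_database"),
--     (("kernel",), "kernel"),
--     (("systemd",), "systemd"),
--     (("docker",), "docker"),
--     (("fail2ban",), "fail2ban"),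
--     (("redis",), "redis_cache"),
--     (("mongodb", "mongo"), "mongodb_database"),
--     (("elasticsearch",), "elasticsearch"),
--     (("rabbitmq",), "rabbitmq_message_broker"),
--     (("kafka",), "kafka_message_broker"),
--     (("jenkins",), "jenkins_ci_cd"),
--     (("gitlab",), "gitlab_version_control"),
--     (("prometheus",), "prometheus_monitoring"),
--     (("grafana",), "grafana_dashboard"),
--     (("vault",), "hashicorp_vault"),
-- ]
--
--
-- def analyze_error_sources(error_entries: List[Dict]) -> Dict[str, int]:
--     """Label-major sieve: pass a shrinking pool of entry indices through the
--     keyword table (each pass labels and removes the entries it matches),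
--     then count the resulting per-entry labels in entry order."""
--     lcs = [e.get("content", "").lower() for e in error_entries]
--     labels = ["unknown_source"] * len(lcs)
--     pool = list(range(len(lcs)))
--     for keywords, label in TABLE:
--         still = []
--         for i in pool:
--             if any(k in lcs[i] for k in keywords):
--                 labels[i] = label
--             else:
--                 still.append(i)
--         pool = still
--     counts = {}
--     for lab in labels:
--         counts[lab] = counts.get(lab, 0) + 1
--     return counts
-- ===== Notes on version B (the rewrite author's own statement) =====
-- stated objective: alternative
-- what changed: B inverts the loop nesting: instead of classifying each entry through the elif cascade, it passes a shrinking pool of entry indices through the keyword table row by row (each row labels and removes the entries it matches, leaving the rest marked unknown_source), then counts the per-entry labels in entry order.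
import Mathlib
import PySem

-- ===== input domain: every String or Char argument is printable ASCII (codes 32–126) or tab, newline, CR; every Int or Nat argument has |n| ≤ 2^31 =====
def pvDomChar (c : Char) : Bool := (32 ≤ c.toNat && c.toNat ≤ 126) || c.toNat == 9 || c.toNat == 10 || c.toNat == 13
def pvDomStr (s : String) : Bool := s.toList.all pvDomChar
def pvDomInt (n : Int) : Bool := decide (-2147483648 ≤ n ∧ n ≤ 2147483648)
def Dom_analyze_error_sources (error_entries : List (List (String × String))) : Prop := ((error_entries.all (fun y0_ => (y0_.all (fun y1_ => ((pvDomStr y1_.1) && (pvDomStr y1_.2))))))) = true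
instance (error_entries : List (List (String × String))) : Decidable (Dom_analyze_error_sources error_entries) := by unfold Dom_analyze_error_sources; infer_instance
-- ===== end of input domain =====

-- B replaces A's per-entry elif cascade by a label-major sieve: a pool of entry
-- indices is passed through the keyword table row by row (each row labels and
-- removes the entries it matches), then labels are counted in entry order
-- (alternative decomposition, same cost).

-- ===== PORT A =====
-- loop body of A: the elif cascade, defaultdict increment = insert (getD + 1)
def analyzeStep (sources : PySem.Dict String Int) (entry : List (String × String)) : PySem.Dict String Int :=
  let content := (PySem.Dict.mk entry).getD "content" ""
  if PySem.Str.isIn "sshd" (PySem.Str.lower content) then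
    sources.insert "ssh_daemon" (sources.getD "ssh_daemon" 0 + 1)
  else if PySem.Str.isIn "apache" (PySem.Str.lower content) || PySem.Str.isIn "httpd" (PySem.Str.lower content) then
    sources.insert "apache_web_server" (sources.getD "apache_web_server" 0 + 1)
  else if PySem.Str.isIn "nginx" (PySem.Str.lower content) then
    sources.insert "nginx_web_server" (sources.getD "nginx_web_server" 0 + 1)
  else if PySem.Str.isIn "mysql" (PySem.Str.lower content) || PySem.Str.isIn "mariadb" (PySem.Str.lower content) then
    sources.insert "mysql_database" (sources.getD "mysql_database" 0 + 1)
  else if PySem.Str.isIn "postgresql" (PySem.Str.lower content) || PySem.Str.isIn "postgres" (PySem.Str.lower content) then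
    sources.insert "postgresql_database" (sources.getD "postgresql_database" 0 + 1)
  else if PySem.Str.isIn "kernel" (PySem.Str.lower content) then
    sources.insert "kernel" (sources.getD "kernel" 0 + 1)
  else if PySem.Str.isIn "systemd" (PySem.Str.lower content) then
    sources.insert "systemd" (sources.getD "systemd" 0 + 1)
  else if PySem.Str.isIn "docker" (PySem.Str.lower content) then
    sources.insert "docker" (sources.getD "docker" 0 + 1)
  else if PySem.Str.isIn "fail2ban" (PySem.Str.lower content) then
    sources.insert "fail2ban" (sources.getD "fail2ban" 0 + 1)
  else if PySem.Str.isIn "redis" (PySem.Str.lower content) then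
    sources.insert "redis_cache" (sources.getD "redis_cache" 0 + 1)
  else if PySem.Str.isIn "mongodb" (PySem.Str.lower content) || PySem.Str.isIn "mongo" (PySem.Str.lower content) then
    sources.insert "mongodb_database" (sources.getD "mongodb_database" 0 + 1)
  else if PySem.Str.isIn "elasticsearch" (PySem.Str.lower content) then
    sources.insert "elasticsearch" (sources.getD "elasticsearch" 0 + 1)
  else if PySem.Str.isIn "rabbitmq" (PySem.Str.lower content) then
    sources.insert "rabbitmq_message_broker" (sources.getD "rabbitmq_message_broker" 0 + 1)
  else if PySem.Str.isIn "kafka" (PySem.Str.lower content) then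
    sources.insert "kafka_message_broker" (sources.getD "kafka_message_broker" 0 + 1)
  else if PySem.Str.isIn "jenkins" (PySem.Str.lower content) then
    sources.insert "jenkins_ci_cd" (sources.getD "jenkins_ci_cd" 0 + 1)
  else if PySem.Str.isIn "gitlab" (PySem.Str.lower content) then
    sources.insert "gitlab_version_control" (sources.getD "gitlab_version_control" 0 + 1)
  else if PySem.Str.isIn "prometheus" (PySem.Str.lower content) then
    sources.insert "prometheus_monitoring" (sources.getD "prometheus_monitoring" 0 + 1)
  else if PySem.Str.isIn "grafana" (PySem.Str.lower content) then
    sources.insert "grafana_dashboard" (sources.getD "grafana_dashboard" 0 + 1)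
  else if PySem.Str.isIn "vault" (PySem.Str.lower content) then
    sources.insert "hashicorp_vault" (sources.getD "hashicorp_vault" 0 + 1)
  else
    sources.insert "unknown_source" (sources.getD "unknown_source" 0 + 1)

def analyze_error_sources (error_entries : List (List (String × String))) : List (String × Int) :=
  (error_entries.foldl analyzeStep PySem.Dict.empty).items

-- ===== PORT B =====
def pvTable : List (List String × String) := [
  (["sshd"], "ssh_daemon"),
  (["apache", "httpd"], "apache_web_server"),
  (["nginx"], "nginx_web_server"),
  (["mysql", "mariadb"], "mysql_database"),
  (["postgresql", "postgres"], "postgresql_database"),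
  (["kernel"], "kernel"),
  (["systemd"], "systemd"),
  (["docker"], "docker"),
  (["fail2ban"], "fail2ban"),
  (["redis"], "redis_cache"),
  (["mongodb", "mongo"], "mongodb_database"),
  (["elasticsearch"], "elasticsearch"),
  (["rabbitmq"], "rabbitmq_message_broker"),
  (["kafka"], "kafka_message_broker"),
  (["jenkins"], "jenkins_ci_cd"),
  (["gitlab"], "gitlab_version_control"),
  (["prometheus"], "prometheus_monitoring"),
  (["grafana"], "grafana_dashboard"),
  (["vault"], "hashicorp_vault")
]

-- one table row: label the matching pool indices, return (labels, still-unmatched pool).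
-- lcs[i] is exact as lcs.getD i "" because every pool index comes from range(len(lcs)).
def pvStage (lcs : List String) (kws : List String) (lab : String) :
    List Nat → List String → List String × List Nat
  | [], labels => (labels, [])
  | i :: rest, labels =>
      if kws.any (fun k => PySem.Str.isIn k (lcs.getD i "")) then
        pvStage lcs kws lab rest (labels.set i lab)
      else
        let p := pvStage lcs kws lab rest labels
        (p.1, i :: p.2)

-- the outer 'for keywords, label in TABLE' loop
def pvSieve (lcs : List String) :
    List (List String × String) → List String → List Nat → List String
  | [], labels, _ => labels
  | (kws, lab) :: rest, labels, pool =>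
      let p := pvStage lcs kws lab pool labels
      pvSieve lcs rest p.1 p.2

def analyze_error_sources_alt (error_entries : List (List (String × String))) : List (String × Int) :=
  let lcs := error_entries.map (fun e => PySem.Str.lower ((PySem.Dict.mk e).getD "content" ""))
  let labels := pvSieve lcs pvTable (List.replicate lcs.length "unknown_source") (List.range lcs.length)
  (labels.foldl (fun (d : PySem.Dict String Int) lab => d.insert lab (d.getD lab 0 + 1)) PySem.Dict.empty).items

-- ===== PRECONDITION & SPEC =====
def Spec_analyze_error_sources (error_entries : List (List (String × String))) (out : List (String × Int)) : Prop := out = analyze_error_sources_alt error_entries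
instance (error_entries : List (List (String × String))) (out : List (String × Int)) : Decidable (Spec_analyze_error_sources error_entries out) := by unfold Spec_analyze_error_sources; infer_instance

-- ===== CLAIM (what is proved, stated in full; the proofs are below) =====
def Claim_equal_analyze_error_sources : Prop := ∀ (error_entries : List (List (String × String))), Dom_analyze_error_sources error_entries → Spec_analyze_error_sources error_entries (analyze_error_sources error_entries)

-- ===== LEMMAS AND PROOFS =====

-- first-match lookup in the table (proof-side characterisation of both programs)
def pvLookup (lc : String) : List (List String × String) → String
  | [] => "unknown_source"
  | (kws, label) :: rest => if kws.any (fun k => PySem.Str.isIn k lc) then label else pvLookup lc rest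

def pvClassify (entry : List (String × String)) : String :=
  pvLookup (PySem.Str.lower ((PySem.Dict.mk entry).getD "content" "")) pvTable

set_option maxHeartbeats 2000000 in
theorem analyzeStep_eq (d : PySem.Dict String Int) (e : List (String × String)) :
    analyzeStep d e = d.insert (pvClassify e) (d.getD (pvClassify e) 0 + 1) := by
  simp only [analyzeStep, pvClassify, pvTable, pvLookup, List.any_cons, List.any_nil,
    Bool.or_false]
  generalize PySem.Str.lower ((PySem.Dict.mk e).getD "content" "") = s
  simp only [apply_ite (fun k : String => d.insert k (d.getD k 0 + 1))]

theorem pvStage_snd (lcs kws : List String) (lab : String) (pool : List Nat) (labels : List String) :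
    (pvStage lcs kws lab pool labels).2
      = pool.filter (fun i => !(kws.any (fun k => PySem.Str.isIn k (lcs.getD i "")))) := by
  induction pool generalizing labels with
  | nil => simp [pvStage]
  | cons i rest ih =>
    simp only [pvStage, List.filter_cons]
    by_cases h : (kws.any (fun k => PySem.Str.isIn k (lcs.getD i ""))) = true
    · simp only [h, if_true, Bool.not_true, Bool.false_eq_true, if_false, ih]
    · rw [if_neg h, Bool.not_eq_true] at *
      simp only [h, Bool.not_false, if_true, ih]

theorem pvStage_fst_get (lcs kws : List String) (lab : String) (pool : List Nat)
    (labels : List String) (hnd : pool.Nodup) (j : Nat) :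
    ((pvStage lcs kws lab pool labels).1)[j]?
      = if j ∈ pool ∧ (kws.any (fun k => PySem.Str.isIn k (lcs.getD j ""))) = true
        then (labels.set j lab)[j]? else labels[j]? := by
  induction pool generalizing labels with
  | nil => simp [pvStage]
  | cons i rest ih =>
    have hnd' : rest.Nodup := hnd.of_cons
    have hni : i ∉ rest := (List.nodup_cons.mp hnd).1
    simp only [pvStage]
    by_cases h : (kws.any (fun k => PySem.Str.isIn k (lcs.getD i ""))) = true
    · rw [if_pos h, ih _ hnd']
      by_cases hji : j = i
      · subst hji
        rw [if_neg (fun hc => hni hc.1), if_pos ⟨by simp, h⟩]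
      · by_cases hjr : j ∈ rest ∧ (kws.any (fun k => PySem.Str.isIn k (lcs.getD j ""))) = true
        · rw [if_pos hjr, if_pos ⟨List.mem_cons_of_mem _ hjr.1, hjr.2⟩,
              List.getElem?_set_self', List.getElem?_set_self',
              List.getElem?_set_ne (fun h' => hji h'.symm)]
        · rw [if_neg hjr, List.getElem?_set_ne (fun h' => hji h'.symm),
              if_neg (fun hc => hjr ⟨(List.mem_cons.mp hc.1).resolve_left hji, hc.2⟩)]
    · rw [if_neg h]
      dsimp only
      rw [ih _ hnd']
      have hiff : (j ∈ i :: rest ∧ (kws.any (fun k => PySem.Str.isIn k (lcs.getD j ""))) = true)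
          ↔ (j ∈ rest ∧ (kws.any (fun k => PySem.Str.isIn k (lcs.getD j ""))) = true) := by
        constructor
        · rintro ⟨hm, hk⟩
          rcases List.mem_cons.mp hm with h1 | h1
          · exact absurd (h1 ▸ hk) h
          · exact ⟨h1, hk⟩
        · rintro ⟨hm, hk⟩
          exact ⟨List.mem_cons_of_mem _ hm, hk⟩
      rw [if_congr hiff rfl rfl]

theorem pvSieve_get (lcs : List String) (tbl : List (List String × String))
    (labels : List String) (pool : List Nat) (hnd : pool.Nodup)
    (hu : ∀ i ∈ pool, labels[i]? = some "unknown_source") (j : Nat) :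
    (pvSieve lcs tbl labels pool)[j]?
      = if j ∈ pool then some (pvLookup (lcs.getD j "") tbl) else labels[j]? := by
  induction tbl generalizing labels pool with
  | nil =>
    simp only [pvSieve, pvLookup]
    by_cases hj : j ∈ pool
    · rw [if_pos hj, hu j hj]
    · rw [if_neg hj]
  | cons row rest ih =>
    obtain ⟨kws, lab⟩ := row
    simp only [pvSieve]
    set labels' := (pvStage lcs kws lab pool labels).1 with hl'
    have hsnd := pvStage_snd lcs kws lab pool labels
    have hget := fun j => pvStage_fst_get lcs kws lab pool labels hnd j
    have hnd' : ((pvStage lcs kws lab pool labels).2).Nodup := by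
      rw [hsnd]; exact hnd.filter _
    have hu' : ∀ i ∈ (pvStage lcs kws lab pool labels).2, labels'[i]? = some "unknown_source" := by
      intro i hi
      rw [hsnd, List.mem_filter] at hi
      have hmf : ¬ ((kws.any (fun k => PySem.Str.isIn k (lcs.getD i ""))) = true) := by
        intro hc
        rw [hc] at hi
        exact absurd hi.2 (by decide)
      rw [hl', hget i, if_neg (fun hc => hmf hc.2)]
      exact hu i hi.1
    rw [ih labels' _ hnd' hu']
    by_cases hj : j ∈ pool
    · by_cases hm : (kws.any (fun k => PySem.Str.isIn k (lcs.getD j ""))) = true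
      · have hj' : j ∉ (pvStage lcs kws lab pool labels).2 := by
          intro hc
          rw [hsnd, List.mem_filter] at hc
          rw [hm] at hc
          exact absurd hc.2 (by decide)
        rw [if_neg hj', hl', hget j, if_pos ⟨hj, hm⟩, List.getElem?_set_self', hu j hj,
            if_pos hj]
        simp only [pvLookup]
        rw [if_pos hm]
        rfl
      · have hmf : (kws.any (fun k => PySem.Str.isIn k (lcs.getD j ""))) = false :=
          Bool.eq_false_iff.mpr hm
        have hj' : j ∈ (pvStage lcs kws lab pool labels).2 := by
          rw [hsnd, List.mem_filter]
          exact ⟨hj, by rw [hmf]; rfl⟩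
        rw [if_pos hj', if_pos hj]
        simp only [pvLookup]
        rw [if_neg hm]
    · have hj' : j ∉ (pvStage lcs kws lab pool labels).2 := by
        rw [hsnd, List.mem_filter]
        exact fun hc => hj hc.1
      rw [if_neg hj', if_neg hj, hl', hget j, if_neg (fun hc => hj hc.1)]

theorem pvSieve_eq_map (lcs : List String) :
    pvSieve lcs pvTable (List.replicate lcs.length "unknown_source") (List.range lcs.length)
      = lcs.map (fun s => pvLookup s pvTable) := by
  apply List.ext_getElem?
  intro j
  rw [pvSieve_get lcs pvTable _ _ (List.nodup_range)
      (by intro i hi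
          rw [List.mem_range] at hi
          simp [hi])]
  by_cases hj : j < lcs.length
  · have hmem : j ∈ List.range lcs.length := List.mem_range.mpr hj
    simp [hmem, List.getElem?_eq_getElem hj]
  · have hmem : j ∉ List.range lcs.length := by simp [List.mem_range, hj]
    simp [hmem, hj]

-- ===== VERDICT (by name: the statement is the Claim_ definition above) =====
theorem analyze_error_sources_spec : Claim_equal_analyze_error_sources := by
  intro es _
  unfold Spec_analyze_error_sources analyze_error_sources analyze_error_sources_alt
  simp only []
  rw [pvSieve_eq_map, List.map_map, List.foldl_map]
  have hstep : analyzeStep = fun d e => d.insert (pvClassify e) (d.getD (pvClassify e) 0 + 1) :=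
    funext fun d => funext fun e => analyzeStep_eq d e
  rw [hstep]
  rfl
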